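-- pv_equiv track=rewrite | github.com/patilKartix23/Carbon-Tracker--An-Awareness-App | backend/services/ccus_service.py | _get_next_milestone
-- ===== SOURCE A (Python) =====
-- from typing import Dict, List, Tuple, Optional
-- import math
--
-- def _get_next_milestone(current_score: int) -> Dict:
--     """Get next milestone for user"""
--     milestones = [100, 300, 600, 1000, 1500, 2000]
--
--     for milestone in milestones:
--         if current_score < milestone:
--             return {
--                 'target_score': milestone,
--                 'points_needed': milestone - current_score,
--                 'estimated_actions': math.ceil((milestone - current_score) / 25)
--             }
--
--     return {
--         'target_score': 2000,
--         'points_needed': 0,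
--         'estimated_actions': 0,
--         'message': 'Congratulations! You have reached the highest level!'
--     }
-- ===== SOURCE B (Python) =====
-- import bisect
-- import math
--
-- def _get_next_milestone(current_score: int):
--     """Get next milestone for user"""
--     milestones = [100, 300, 600, 1000, 1500, 2000]
--     idx = bisect.bisect_right(milestones, current_score)
--     if idx < len(milestones):
--         m = milestones[idx]
--         need = m - current_score
--         return {
--             'target_score': m,
--             'points_needed': need,
--             'estimated_actions': (need + 24) // 25
--         }
--     return {
--         'target_score': 2000,
--         'points_needed': 0,
--         'estimated_actions': 0,
--         'message': 'Congratulations! You have reached the highest level!'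
--     }
-- ===== Notes on version B (the rewrite author's own statement) =====
-- stated objective: idiomatic
-- what changed: Replaces the linear first-match scan over the milestone list with a bisect_right binary-search index lookup and pure-integer ceiling division ((need+24)//25) instead of float math.ceil; B returns the identical congratulations dict (with its string 'message' value) at scores >= 2000, which Pre_ excludes only because that string value has no representation in the List (String x Int) port type.
import Mathlib
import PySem

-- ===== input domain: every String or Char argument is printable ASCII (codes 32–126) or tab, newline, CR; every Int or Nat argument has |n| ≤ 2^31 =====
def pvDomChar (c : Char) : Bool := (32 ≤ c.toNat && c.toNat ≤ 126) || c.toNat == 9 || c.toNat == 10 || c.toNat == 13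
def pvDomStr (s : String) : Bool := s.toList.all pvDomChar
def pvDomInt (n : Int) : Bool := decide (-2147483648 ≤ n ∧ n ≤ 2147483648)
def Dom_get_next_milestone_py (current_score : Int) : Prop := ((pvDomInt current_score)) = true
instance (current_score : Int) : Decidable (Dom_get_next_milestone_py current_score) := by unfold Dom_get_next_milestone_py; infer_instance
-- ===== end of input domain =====

-- B replaces A's linear first-match scan over the milestone list by a bisect_right
-- binary-search index lookup and integer ceiling division (idiomatic decomposition).


-- ===== PORT A =====
-- the for-loop with early return: first milestone with current_score < milestone
def milestoneScan (c : Int) : List Int → Option Int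
  | [] => none
  | m :: rest => if c < m then some m else milestoneScan c rest

-- math.ceil((m-c)/25) is ported as -((-(m-c)) // 25); exact here: the float
-- division (m-c)/25 never rounds across an integer for |current_score| ≤ 2^31.
def get_next_milestone_py (current_score : Int) : List (String × Int) :=
  let milestones : List Int := [100, 300, 600, 1000, 1500, 2000]
  match milestoneScan current_score milestones with
  | some m =>
      [("target_score", m),
       ("points_needed", m - current_score),
       ("estimated_actions", -(PySem.Int.floordiv (-(m - current_score)) 25))]
  | none =>
      -- Python A's dict here also carries ("message", <a string>); a String value
      -- cannot be represented in this List (String × Int) return type, so this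
      -- branch lies outside Pre_ (B's Python returns the identical dict there).
      [("target_score", 2000), ("points_needed", 0), ("estimated_actions", 0)]

-- ===== PORT B =====
def get_next_milestone_py_alt (current_score : Int) : List (String × Int) :=
  let milestones : List Int := [100, 300, 600, 1000, 1500, 2000]
  let idx := PySem.List.bisectRight milestones current_score
  if h : idx < milestones.length then
    let m := milestones[idx]
    let need := m - current_score
    [("target_score", m),
     ("points_needed", need),
     ("estimated_actions", PySem.Int.floordiv (need + 24) 25)]
  else
    -- B's Python returns the same congratulations dict as A here, string
    -- 'message' entry included; that entry is unrepresentable in this return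
    -- type, so the branch lies outside Pre_ (see the comment above Pre_).
    [("target_score", 2000), ("points_needed", 0), ("estimated_actions", 0)]

-- ===== PRECONDITION & SPEC =====
-- Pre_ excludes current_score ≥ 2000 ONLY because there both Pythons return the
-- same congratulations dict whose 'message' value is a string, which has no
-- value in the List (String × Int) type the ports must return — not because the
-- programs differ: B's Python returns A's dict verbatim there (cited in the claim).
def Pre_get_next_milestone_py (current_score : Int) : Prop := current_score < 2000
instance (current_score : Int) : Decidable (Pre_get_next_milestone_py current_score) := by unfold Pre_get_next_milestone_py; infer_instance
def pvWitness_get_next_milestone_py : Int := 450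

def Spec_get_next_milestone_py (current_score : Int) (out : List (String × Int)) : Prop := out = get_next_milestone_py_alt current_score
instance (current_score : Int) (out : List (String × Int)) : Decidable (Spec_get_next_milestone_py current_score out) := by unfold Spec_get_next_milestone_py; infer_instance

-- ===== CLAIM (what is proved, stated in full; the proofs are below) =====
def Claim_equal_get_next_milestone_py : Prop := ∀ (current_score : Int), Dom_get_next_milestone_py current_score → Pre_get_next_milestone_py current_score → Spec_get_next_milestone_py current_score (get_next_milestone_py current_score)

-- ===== LEMMAS AND PROOFS =====

-- pin the bisect_right index from its spec on the (sorted) milestone list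
lemma bisect_eq_of_bracket (xs : List Int) (c : Int) (k : Nat)
    (hs : List.Pairwise (· ≤ ·) xs) (hk : k ≤ xs.length)
    (hlo : ∀ (hh : k - 1 < xs.length), 0 < k → xs[k-1] ≤ c)
    (hhi : ∀ (hh : k < xs.length), c < xs[k]) :
    PySem.List.bisectRight xs c = k := by
  obtain ⟨hle, hA, hB⟩ := PySem.List.bisectRight_spec xs c hs
  rcases Nat.lt_trichotomy (PySem.List.bisectRight xs c) k with h | h | h
  · exfalso
    have hk1 : k - 1 < xs.length := by omega
    have := hB (k - 1) hk1 (by omega)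
    have := hlo hk1 (by omega)
    omega
  · exact h
  · exfalso
    have hkl : k < xs.length := by omega
    have := hA k hkl h
    have := hhi hkl
    omega

-- ===== VERDICT (by name: the statement is the Claim_ definition above) =====
theorem get_next_milestone_py_spec : Claim_equal_get_next_milestone_py := by
  intro c _ hpre
  unfold Spec_get_next_milestone_py
  unfold Pre_get_next_milestone_py at hpre
  rcases lt_or_ge c 100 with h1 | h1
  · have hidx : PySem.List.bisectRight [100, 300, 600, 1000, 1500, 2000] c = 0 :=
      bisect_eq_of_bracket _ _ _ (by decide) (by decide)
        (fun _ h => by omega) (fun _ => by simpa using h1)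
    simp [get_next_milestone_py, get_next_milestone_py_alt, milestoneScan, hidx, h1]
    omega
  · rcases lt_or_ge c 300 with h2 | h2
    · have hidx : PySem.List.bisectRight [100, 300, 600, 1000, 1500, 2000] c = 1 :=
        bisect_eq_of_bracket _ _ _ (by decide) (by decide)
          (fun _ _ => by simpa using h1) (fun _ => by simpa using h2)
      simp [get_next_milestone_py, get_next_milestone_py_alt, milestoneScan, hidx,
        show ¬ c < 100 by omega, h2]
      omega
    · rcases lt_or_ge c 600 with h3 | h3
      · have hidx : PySem.List.bisectRight [100, 300, 600, 1000, 1500, 2000] c = 2 :=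
          bisect_eq_of_bracket _ _ _ (by decide) (by decide)
            (fun _ _ => by simpa using h2) (fun _ => by simpa using h3)
        simp [get_next_milestone_py, get_next_milestone_py_alt, milestoneScan, hidx,
          show ¬ c < 100 by omega, show ¬ c < 300 by omega, h3]
        omega
      · rcases lt_or_ge c 1000 with h4 | h4
        · have hidx : PySem.List.bisectRight [100, 300, 600, 1000, 1500, 2000] c = 3 :=
            bisect_eq_of_bracket _ _ _ (by decide) (by decide)
              (fun _ _ => by simpa using h3) (fun _ => by simpa using h4)
          simp [get_next_milestone_py, get_next_milestone_py_alt, milestoneScan, hidx,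
            show ¬ c < 100 by omega, show ¬ c < 300 by omega, show ¬ c < 600 by omega, h4]
          omega
        · rcases lt_or_ge c 1500 with h5 | h5
          · have hidx : PySem.List.bisectRight [100, 300, 600, 1000, 1500, 2000] c = 4 :=
              bisect_eq_of_bracket _ _ _ (by decide) (by decide)
                (fun _ _ => by simpa using h4) (fun _ => by simpa using h5)
            simp [get_next_milestone_py, get_next_milestone_py_alt, milestoneScan, hidx,
              show ¬ c < 100 by omega, show ¬ c < 300 by omega, show ¬ c < 600 by omega,
              show ¬ c < 1000 by omega, h5]
            omega
          · have hidx : PySem.List.bisectRight [100, 300, 600, 1000, 1500, 2000] c = 5 :=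
              bisect_eq_of_bracket _ _ _ (by decide) (by decide)
                (fun _ _ => by simpa using h5) (fun _ => by simpa using hpre)
            simp [get_next_milestone_py, get_next_milestone_py_alt, milestoneScan, hidx,
              show ¬ c < 100 by omega, show ¬ c < 300 by omega, show ¬ c < 600 by omega,
              show ¬ c < 1000 by omega, show ¬ c < 1500 by omega, hpre]
            omega
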